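-- pv_equiv track=rewrite | github.com/Sammy-Geeeee/Coded_Text_1.0 | functions.py | de_encrypt_letterorder
-- ===== SOURCE A (Python) =====
-- def de_encrypt_letterorder(text, offset):
--     new_characters = []  # To store the new word order in
--
--     words = text.split()  # To split the text string into a list of words
--     for word in words:  # To loop through each word
--         word_offset = offset  # To set the initial offset for each word
--
--         if len(word) > 1:  # Only if the word is longer than 1 character
--             for i in range(len(word)):  # To loop through the index in each word
--
--                 while abs(word_offset) >= len(word):  # While the offset is longer than the list
--                     if word_offset > 0:  # For positive offsets (encryption)
--                         word_offset = word_offset - len(word)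
--                     elif word_offset < 0:  # For negative offsets (decryption)
--                         word_offset = -(abs(word_offset) - len(word))
--
--                 new_i = i + word_offset  # The new index is the original plus an offset
--
--                 while new_i >= len(word):  # If the offset index is greater than the words max index
--                     new_i = new_i - (len(word))  # Index position will go back to fill in from the start
--
--                 new_characters.append(word[new_i])  # To add all the characters to the new characters list
--
--             new_characters.append(' ')  # To add spaces back in between the words
--
--         else:  # If the word is only one letter long
--             new_characters.append(word)  # New characters is just the one word
--             new_characters.append(' ')  # Need to add space as above line too
--
--     if len(new_characters) > 1:  # If there is more than one new character
--         del new_characters[-1]  # To delete the trailing space from the list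
--
--     new_text = ''.join(new_characters)  # To join all the characters into a single text string
--     return new_text
-- ===== SOURCE B (Python) =====
-- def de_encrypt_letterorder(text, offset):
--     # Slice-based rotation: each word is rotated left by offset mod len(word).
--     rotated = []
--     for w in text.split():
--         k = offset % len(w)
--         rotated.append(w[k:] + w[:k])
--     return ' '.join(rotated)
-- ===== Notes on version B (the rewrite author's own statement) =====
-- stated objective: simpler
-- what changed: Replaces the per-character loop with its modular-reduction while-loops and the append-space/delete-trailing-space bookkeeping by a single slice rotation w[k:]+w[:k] with k = offset % len(w) per word, joined with ' '.join.
import Mathlib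
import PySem

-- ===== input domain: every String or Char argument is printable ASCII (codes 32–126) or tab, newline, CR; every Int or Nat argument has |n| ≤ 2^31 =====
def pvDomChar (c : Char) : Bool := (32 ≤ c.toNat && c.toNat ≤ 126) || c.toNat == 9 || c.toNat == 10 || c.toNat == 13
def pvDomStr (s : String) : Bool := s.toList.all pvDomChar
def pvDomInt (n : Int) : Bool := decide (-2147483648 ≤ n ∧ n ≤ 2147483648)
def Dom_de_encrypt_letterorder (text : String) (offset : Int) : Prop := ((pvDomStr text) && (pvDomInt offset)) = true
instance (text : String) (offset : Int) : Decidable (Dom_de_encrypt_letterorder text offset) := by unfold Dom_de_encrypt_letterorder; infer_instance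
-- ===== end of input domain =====

-- B replaces A's per-character loop with modular while-reductions by a per-word slice rotation
-- w[k:] + w[:k], k = offset % len(w), joined by ' '.join (simpler; return value only, no mutation).

-- B replaces A's per-character loop with its modular-reduction while-loops and the
-- append-space/delete-trailing-space bookkeeping by a per-word slice rotation
-- w[k:] + w[:k], k = offset % len(w), joined with ' '.join (simpler; no argument is mutated).

-- ===== PORT A =====
-- 'while abs(word_offset) >= len(word): ...'. The dite guard 1 ≤ L is only for totality:
-- Python enters the loop body exactly when L ≤ |wo|, and this helper is only applied with L ≥ 2.
def pvReduceOff (wo L : Int) : Int :=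
  if h : 1 ≤ L ∧ L ≤ |wo| then
    if h2 : 0 < wo then pvReduceOff (wo - L) L
    else if h3 : wo < 0 then pvReduceOff (-(|wo| - L)) L
    else wo  -- unreachable under the guard (wo = 0 gives |wo| = 0 < 1 ≤ L)
  else wo
termination_by wo.natAbs
decreasing_by
  · simp only [Int.abs_eq_natAbs] at h; omega
  · simp only [Int.abs_eq_natAbs] at h ⊢; omega

-- 'while new_i >= len(word): new_i = new_i - len(word)'; the 1 ≤ L conjunct is for totality only.
def pvReduceIdx (ni L : Int) : Int :=
  if h : 1 ≤ L ∧ L ≤ ni then pvReduceIdx (ni - L) L else ni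
termination_by ni.toNat
decreasing_by omega

-- the inner 'for i in range(len(word))' loop, carrying (word_offset, appended characters);
-- word[new_i] is PySem.Str.pyGet? (it is never none here: -len(word) < new_i < len(word)).
def pvWordChars (w : String) (offset : Int) : List String :=
  ((PySem.List.pyRange 0 (PySem.Str.len w) 1).foldl
    (fun (st : Int × List String) i =>
      let wo := pvReduceOff st.1 (PySem.Str.len w)
      let ni := pvReduceIdx (i + wo) (PySem.Str.len w)
      (wo, st.2 ++ [((PySem.Str.pyGet? w ni).map (fun c => String.ofList [c])).getD ""]))
    (offset, [])).2

def de_encrypt_letterorder (text : String) (offset : Int) : String :=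
  let words := PySem.Str.split₀ text
  let new_characters := words.foldl
    (fun (acc : List String) w =>
      if 1 < PySem.Str.len w then (acc ++ pvWordChars w offset) ++ [" "]
      else (acc ++ [w]) ++ [" "]) []
  PySem.Str.join "" (if 1 < new_characters.length then new_characters.dropLast else new_characters)

-- ===== PORT B =====
-- w[k:] + w[:k] with k = offset % len(w)
def pvRotWord (w : String) (offset : Int) : String :=
  let k := PySem.Int.mod offset (PySem.Str.len w)
  String.ofList (PySem.List.slice w.toList (some k) none ++ PySem.List.slice w.toList none (some k))

def de_encrypt_letterorder_alt (text : String) (offset : Int) : String :=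
  PySem.Str.join " " ((PySem.Str.split₀ text).map (fun w => pvRotWord w offset))

-- ===== PRECONDITION & SPEC =====
def Spec_de_encrypt_letterorder (text : String) (offset : Int) (out : String) : Prop := out = de_encrypt_letterorder_alt text offset
instance (text : String) (offset : Int) (out : String) : Decidable (Spec_de_encrypt_letterorder text offset out) := by unfold Spec_de_encrypt_letterorder; infer_instance

-- ===== CLAIM (what is proved, stated in full; the proofs are below) =====
def Claim_equal_de_encrypt_letterorder : Prop := ∀ (text : String) (offset : Int), Dom_de_encrypt_letterorder text offset → Spec_de_encrypt_letterorder text offset (de_encrypt_letterorder text offset)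

-- ===== LEMMAS AND PROOFS =====

theorem pvReduceOff_spec (wo L : Int) (hL : 1 ≤ L) :
    |pvReduceOff wo L| < L ∧ pvReduceOff wo L % L = wo % L := by
  induction wo using pvReduceOff.induct (L := L) with
  | case1 wo h h2 ih =>
    rw [pvReduceOff, dif_pos h, dif_pos h2]
    exact ⟨ih.1, ih.2.trans (Int.sub_emod_right wo L)⟩
  | case2 wo h h2 h3 ih =>
    rw [pvReduceOff, dif_pos h, dif_neg h2, dif_pos h3]
    refine ⟨ih.1, ih.2.trans ?_⟩
    have e : -(|wo| - L) = wo + L * 1 := by rw [abs_of_neg h3]; ring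
    rw [e, Int.add_mul_emod_self_left]
  | case3 wo h h2 h3 =>
    exfalso; rcases h with ⟨h1, h4⟩
    simp only [Int.abs_eq_natAbs] at h4; omega
  | case4 wo h =>
    rw [pvReduceOff, dif_neg h]
    refine ⟨?_, rfl⟩
    push_neg at h; exact h hL

theorem pvReduceOff_idem (wo L : Int) (hL : 1 ≤ L) :
    pvReduceOff (pvReduceOff wo L) L = pvReduceOff wo L := by
  conv_lhs => rw [pvReduceOff]
  rw [dif_neg]
  rintro ⟨-, h2⟩
  exact absurd h2 (not_le.mpr (pvReduceOff_spec wo L hL).1)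

theorem pvReduceIdx_spec (ni L : Int) (hL : 1 ≤ L) :
    pvReduceIdx ni L < L ∧ min ni 0 ≤ pvReduceIdx ni L ∧ pvReduceIdx ni L % L = ni % L := by
  induction ni using pvReduceIdx.induct (L := L) with
  | case1 ni h ih =>
    rw [pvReduceIdx, dif_pos h]
    refine ⟨ih.1, ?_, ih.2.2.trans (Int.sub_emod_right ni L)⟩
    have := ih.2.1; omega
  | case2 ni h =>
    rw [pvReduceIdx, dif_neg h]
    push_neg at h
    exact ⟨h hL, by omega, rfl⟩

theorem pvCharA (cs : List Char) (i : Nat) (offset r : Int)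
    (hi : i < cs.length) (hr : |r| < (cs.length : Int))
    (hrm : r % (cs.length : Int) = offset % (cs.length : Int)) :
    PySem.List.pyGet? cs (pvReduceIdx ((i : Int) + r) (cs.length : Int))
      = cs[(((i : Int) + offset) % (cs.length : Int)).toNat]? := by
  have hL : 1 ≤ (cs.length : Int) := by exact_mod_cast Nat.one_le_iff_ne_zero.mpr (by omega)
  obtain ⟨h1, h2, h3⟩ := pvReduceIdx_spec ((i : Int) + r) (cs.length : Int) hL
  set ni := pvReduceIdx ((i : Int) + r) (cs.length : Int) with hni
  have habs := abs_lt.mp hr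
  have hadd : ((i : Int) + r) % (cs.length : Int) = ((i : Int) + offset) % (cs.length : Int) := by
    rw [Int.add_emod, hrm, ← Int.add_emod]
  have he1 : 0 ≤ ((i : Int) + offset) % (cs.length : Int) := Int.emod_nonneg _ (by omega)
  have he2 : ((i : Int) + offset) % (cs.length : Int) < (cs.length : Int) := Int.emod_lt_of_pos _ (by omega)
  simp only [PySem.List.pyGet?, PySem.List.pyIdx?]
  by_cases hnn : 0 ≤ ni
  · rw [if_pos hnn, if_pos h1]
    have : ni = ((i : Int) + offset) % (cs.length : Int) := by
      rw [← hadd, ← h3, Int.emod_eq_of_lt hnn h1]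
    rw [this]
    simp
  · push_neg at hnn
    rw [if_neg (by omega), if_pos (by omega)]
    have hsum : ni + (cs.length : Int) = ((i : Int) + offset) % (cs.length : Int) := by
      have e1 : (ni + (cs.length : Int)) % (cs.length : Int) = ni % (cs.length : Int) := by
        have := Int.add_mul_emod_self_left ni (cs.length : Int) 1
        simpa using this
      rw [← hadd, ← h3, ← e1, Int.emod_eq_of_lt (by omega) (by omega)]
    have : cs.length - (-ni).toNat = (((i : Int) + offset) % (cs.length : Int)).toNat := by omega
    rw [this]
    simp

theorem pvWordChars_eq (w : String) (offset : Int) (hw : 1 < w.toList.length) :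
    pvWordChars w offset
      = (List.range w.toList.length).map
          (fun (i : Nat) => String.ofList [w.toList[(((i : Int) + offset) % (w.toList.length : Int)).toNat]?.getD ' ']) := by
  have hL : 1 ≤ (w.toList.length : Int) := by exact_mod_cast Nat.one_le_iff_ne_zero.mpr (by omega)
  obtain ⟨hr1, hr2⟩ := pvReduceOff_spec offset (w.toList.length : Int) hL
  unfold pvWordChars
  simp only [PySem.Str.len_eq, PySem.List.pyRange_zero_natCast]
  set L : Int := (w.toList.length : Int) with hLdef
  set G : Int → Int → String := fun r i =>
    ((PySem.Str.pyGet? w (pvReduceIdx (i + r) L)).map (fun c => String.ofList [c])).getD "" with hG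
  have key : ∀ (is : List Int) (s : Int) (acc : List String),
      (is.foldl (fun (st : Int × List String) i =>
        (pvReduceOff st.1 L, st.2 ++ [G (pvReduceOff st.1 L) i])) (s, acc)).2
      = acc ++ is.map (fun i => G (pvReduceOff s L) i) := by
    intro is
    induction is with
    | nil => intro s acc; simp
    | cons i is ih =>
      intro s acc
      simp only [List.foldl_cons, List.map_cons]
      rw [ih, pvReduceOff_idem s L hL]
      simp
  have step_eq : (fun (st : Int × List String) i =>
        let wo := pvReduceOff st.1 L
        let ni := pvReduceIdx (i + wo) L
        (wo, st.2 ++ [((PySem.Str.pyGet? w ni).map (fun c => String.ofList [c])).getD ""]))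
      = (fun (st : Int × List String) i =>
        (pvReduceOff st.1 L, st.2 ++ [G (pvReduceOff st.1 L) i])) := rfl
  rw [step_eq, key]
  rw [List.map_map, List.nil_append]
  apply List.map_congr_left
  intro k hk
  have hk' := List.mem_range.mp hk
  simp only [Function.comp]
  rw [hG]
  simp only [PySem.Str.pyGet?_eq]
  have hcs : PySem.Chars.pyGet? w.toList = PySem.List.pyGet? w.toList := rfl
  rw [hcs, pvCharA w.toList k offset (pvReduceOff offset L) (List.mem_range.mp hk) hr1 hr2]
  have hlt : ((((k : Int) + offset) % L).toNat) < w.toList.length := by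
    have h1 := Int.emod_lt_of_pos ((k : Int) + offset) (b := L) (by omega)
    have h2 := Int.emod_nonneg ((k : Int) + offset) (b := L) (by omega)
    omega
  rw [List.getElem?_eq_getElem hlt]
  simp

theorem pvJoinNilFlatten (l : List (List Char)) : PySem.Chars.join [] l = l.flatten := by
  induction l with
  | nil => simp [PySem.Chars.join_nil]
  | cons a l ih =>
    cases l with
    | nil => simp [PySem.Chars.join_singleton]
    | cons b t => rw [PySem.Chars.join_cons_cons, ih]; simp

theorem pvRotWord_toList (w : String) (offset : Int) (hw : w.toList ≠ []) :
    (pvRotWord w offset).toList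
      = w.toList.drop ((offset % (w.toList.length : Int)).toNat)
        ++ w.toList.take ((offset % (w.toList.length : Int)).toNat) := by
  have hn : 0 < w.toList.length := List.length_pos_of_ne_nil hw
  have hL : (0 : Int) < (w.toList.length : Int) := by exact_mod_cast hn
  unfold pvRotWord
  simp only [PySem.Str.len_eq]
  have hmod : PySem.Int.mod offset (w.toList.length : Int) = offset % (w.toList.length : Int) := by
    unfold PySem.Int.mod
    rw [Int.fmod_eq_emod, if_pos (Or.inl hL.le), add_zero]
  rw [hmod, PySem.List.slice_from w.toList (Int.emod_nonneg _ (by omega)),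
      PySem.List.slice_to w.toList (Int.emod_nonneg _ (by omega)), String.toList_ofList]

theorem pvRotEq (cs : List Char) (offset : Int) (h : cs ≠ []) :
    (List.range cs.length).map
        (fun (i : Nat) => cs[(((i : Int) + offset) % (cs.length : Int)).toNat]?.getD ' ')
      = cs.drop ((offset % (cs.length : Int)).toNat) ++ cs.take ((offset % (cs.length : Int)).toNat) := by
  have hn : 0 < cs.length := List.length_pos_of_ne_nil h
  have hL : (0 : Int) < (cs.length : Int) := by exact_mod_cast hn
  have hk1 : 0 ≤ offset % (cs.length : Int) := Int.emod_nonneg _ (by omega)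
  have hk2 : offset % (cs.length : Int) < (cs.length : Int) := Int.emod_lt_of_pos _ hL
  have hk'le : (offset % (cs.length : Int)).toNat ≤ cs.length := by omega
  rw [← List.rotate_eq_drop_append_take hk'le]
  apply List.ext_getElem
  · simp [List.length_rotate]
  · intro j h1 h2
    simp only [List.getElem_map, List.getElem_range, List.getElem_rotate]
    have hj : j < cs.length := by simpa using h2
    have he1 : 0 ≤ ((j : Int) + offset) % (cs.length : Int) := Int.emod_nonneg _ (by omega)
    have he2 : ((j : Int) + offset) % (cs.length : Int) < (cs.length : Int) := Int.emod_lt_of_pos _ hL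
    have hint : (((j + (offset % (cs.length : Int)).toNat) % cs.length : Nat) : Int)
        = ((j : Int) + offset) % (cs.length : Int) := by
      push_cast [Int.toNat_of_nonneg hk1]
      conv_lhs => rw [Int.add_emod]
      conv_rhs => rw [Int.add_emod]
      rw [Int.emod_emod_of_dvd _ dvd_rfl]
    have hidx : (((j : Int) + offset) % (cs.length : Int)).toNat
        = (j + (offset % (cs.length : Int)).toNat) % cs.length := by
      rw [← hint, Int.toNat_natCast]
    rw [List.getElem?_eq_getElem (by omega), Option.getD_some]
    congr 1

theorem pvWord_eq (w : String) (offset : Int) (hw : w.toList ≠ []) :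
    PySem.Chars.join []
      ((if 1 < PySem.Str.len w then pvWordChars w offset else [w]).map String.toList)
      = (pvRotWord w offset).toList := by
  have hn : 0 < w.toList.length := List.length_pos_of_ne_nil hw
  rw [pvRotWord_toList w offset hw]
  by_cases hlen : 1 < w.toList.length
  · rw [if_pos (by simpa [PySem.Str.len_eq] using (by exact_mod_cast hlen : (1:Int) < (w.toList.length : Int)))]
    rw [pvWordChars_eq w offset hlen, List.map_map]
    have : (String.toList ∘ fun (i : Nat) =>
        String.ofList [w.toList[(((i : Int) + offset) % (w.toList.length : Int)).toNat]?.getD ' '])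
        = (fun c => [c]) ∘ (fun (i : Nat) => w.toList[(((i : Int) + offset) % (w.toList.length : Int)).toNat]?.getD ' ') := by
      funext i; simp [Function.comp]
    rw [this, ← List.map_map, PySem.Chars.join_nil_singletons]
    exact pvRotEq w.toList offset hw
  · rw [if_neg (by simpa [PySem.Str.len_eq] using (by exact_mod_cast hlen : ¬ (1:Int) < (w.toList.length : Int)))]
    have h1 : w.toList.length = 1 := by omega
    rw [List.map_singleton, PySem.Chars.join_singleton, h1]
    simp [Int.emod_one]

theorem pvWordPieces_ne_nil (w : String) (offset : Int) (hw : w.toList ≠ []) :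
    (if 1 < PySem.Str.len w then pvWordChars w offset else [w]) ≠ [] := by
  split
  · next hlen =>
    have hlen' : 1 < w.toList.length := by
      simp only [PySem.Str.len_eq] at hlen; exact_mod_cast hlen
    rw [pvWordChars_eq w offset hlen']
    apply List.ne_nil_of_length_pos
    rw [List.length_map, List.length_range]
    omega
  · simp

theorem pvSplitGo_ne (s : List Char) : ∀ (cur : List Char) (acc : List (List Char)),
    (∀ x ∈ acc, x ≠ []) → ∀ x ∈ PySem.Chars.split₀.go s cur acc, x ≠ [] := by
  induction s with
  | nil =>
    intro cur acc hacc x hx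
    simp only [PySem.Chars.split₀.go] at hx
    split at hx
    · exact hacc x (List.mem_reverse.mp hx)
    · next hc =>
      have hcur : cur ≠ [] := by simpa using hc
      rcases List.mem_cons.mp (List.mem_reverse.mp hx) with h | h
      · subst h; simpa using hcur
      · exact hacc x h
  | cons c rest ih =>
    intro cur acc hacc x hx
    simp only [PySem.Chars.split₀.go] at hx
    split at hx
    · split at hx
      · exact ih [] acc hacc x hx
      · next hc =>
        refine ih [] _ ?_ x hx
        intro y hy
        have hcur : cur ≠ [] := by simpa using hc
        rcases List.mem_cons.mp hy with h | h
        · subst h; simpa using hcur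
        · exact hacc y h
    · exact ih (c :: cur) acc hacc x hx

theorem split₀_ne_nil (s : String) (w : String) (h : w ∈ PySem.Str.split₀ s) : w.toList ≠ [] := by
  have : w.toList ∈ List.map String.toList (PySem.Str.split₀ s) := List.mem_map_of_mem h
  rw [PySem.Str.split₀_map_toList] at this
  exact pvSplitGo_ne s.toList [] [] (by simp) w.toList this

theorem pvFlatMap_len (offset : Int) (w : String) (ws : List String) (hws : ∀ v ∈ w :: ws, v.toList ≠ []) :
    1 < ((w :: ws).flatMap (fun v => (if 1 < PySem.Str.len v then pvWordChars v offset else [v]) ++ [" "])).length := by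
  rw [List.flatMap_cons, List.length_append, List.length_append]
  have h1 : 0 < (if 1 < PySem.Str.len w then pvWordChars w offset else [w]).length :=
    List.length_pos_of_ne_nil (pvWordPieces_ne_nil w offset (hws w (by simp)))
  simp only [List.length_cons, List.length_nil]
  omega

theorem pvAssembleChars (offset : Int) : ∀ (ws : List String), (∀ w ∈ ws, w.toList ≠ []) →
    PySem.Chars.join []
      ((let nc := ws.flatMap (fun w => (if 1 < PySem.Str.len w then pvWordChars w offset else [w]) ++ [" "]);
        if 1 < nc.length then nc.dropLast else nc).map String.toList)
    = PySem.Chars.join [' '] (ws.map (fun w => (pvRotWord w offset).toList)) := by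
  intro ws
  induction ws with
  | nil => intro _; simp [PySem.Chars.join_nil]
  | cons w ws ih =>
    intro hws
    simp only
    rw [if_pos (pvFlatMap_len offset w ws hws)]
    rw [List.flatMap_cons]
    cases ws with
    | nil =>
      simp only [List.flatMap_nil, List.append_nil]
      have hdl : ([" "] : List String).dropLast = [] := rfl
      rw [List.dropLast_append_of_ne_nil (by simp), hdl, List.append_nil]
      rw [pvJoinNilFlatten, ← pvJoinNilFlatten, pvWord_eq w offset (hws w (by simp))]
      simp [PySem.Chars.join_singleton]
    | cons w' ws' =>
      have hrest1 : 1 < ((w' :: ws').flatMap (fun v => (if 1 < PySem.Str.len v then pvWordChars v offset else [v]) ++ [" "])).length :=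
        pvFlatMap_len offset w' ws' (fun v hv => hws v (List.mem_cons_of_mem _ hv))
      have hrest_ne : ((w' :: ws').flatMap (fun v => (if 1 < PySem.Str.len v then pvWordChars v offset else [v]) ++ [" "])) ≠ [] := by
        apply List.ne_nil_of_length_pos; omega
      rw [List.dropLast_append_of_ne_nil hrest_ne, List.map_append, List.map_append,
          pvJoinNilFlatten, List.flatten_append, List.flatten_append]
      have hih := ih (fun v hv => hws v (List.mem_cons_of_mem _ hv))
      simp only at hih
      rw [if_pos hrest1] at hih
      rw [pvJoinNilFlatten] at hih
      rw [hih]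
      rw [← pvJoinNilFlatten, pvWord_eq w offset (hws w (by simp))]
      have hsp : List.map String.toList ([" "] : List String) = [[' ']] := rfl
      rw [hsp]
      simp only [List.map_cons]
      rw [PySem.Chars.join_cons_cons]
      simp [List.append_assoc]

theorem pvMain (text : String) (offset : Int) :
    de_encrypt_letterorder text offset = de_encrypt_letterorder_alt text offset := by
  simp only [de_encrypt_letterorder, de_encrypt_letterorder_alt]
  have hstep : (fun (acc : List String) w =>
      if 1 < PySem.Str.len w then (acc ++ pvWordChars w offset) ++ [" "]
      else (acc ++ [w]) ++ [" "])
    = fun acc w => acc ++ ((if 1 < PySem.Str.len w then pvWordChars w offset else [w]) ++ [" "]) := by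
    funext acc w; split <;> simp
  rw [hstep, PySem.List.foldl_append_eq_flatMap, List.nil_append]
  apply String.toList_inj.mp
  rw [PySem.Str.toList_join, PySem.Str.toList_join]
  have h0 : ("" : String).toList = [] := rfl
  have h1 : (" " : String).toList = [' '] := rfl
  rw [h0, h1]
  have := pvAssembleChars offset (PySem.Str.split₀ text) (fun w hw => split₀_ne_nil text w hw)
  simp only at this
  rw [List.map_map]
  exact this

-- ===== VERDICT (by name: the statement is the Claim_ definition above) =====
theorem de_encrypt_letterorder_spec : Claim_equal_de_encrypt_letterorder := by
  intro text offset _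
  exact pvMain text offset
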